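-- pv_equiv track=rewrite | github.com/LastDayWithLess/web_lab_aib_frontend | labs/Lab_12_python_intro/solution/task2.py | calculate_medians
-- ===== SOURCE A (Python) =====
-- import heapq
--
-- def calculate_medians(nums):
--     min_heap = []  # Мин-куча для хранения большей половины элементов
--     max_heap = []  # Макс-куча для хранения меньшей половины элементов
--     medians_sum = 0
--
--     for i, num in enumerate(nums):
--         if not max_heap or num < -max_heap[0]:
--             heapq.heappush(max_heap, -num)
--         else:
--             heapq.heappush(min_heap, num)
--
--         # Балансируем кучи
--         if len(max_heap) > len(min_heap) + 1:
--             heapq.heappush(min_heap, -heapq.heappop(max_heap))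
--         elif len(min_heap) > len(max_heap):
--             heapq.heappush(max_heap, -heapq.heappop(min_heap))
--
--         # Находим текущую медиану
--         if i % 2 == 0:
--             medians_sum += -max_heap[0] if len(max_heap) > len(min_heap) else min_heap[0]
--         else:
--             medians_sum += -max_heap[0]
--
--     return medians_sum
-- ===== SOURCE B (Python) =====
-- import bisect
--
-- def calculate_medians(nums):
--     sorted_prefix = []
--     total = 0
--     for num in nums:
--         bisect.insort(sorted_prefix, num)
--         total += sorted_prefix[(len(sorted_prefix) - 1) // 2]
--     return total
-- ===== Notes on version B (the rewrite author's own statement) =====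
-- stated objective: idiomatic
-- what changed: Replaced the two balanced heaps (heapq push/pop with negation tricks and rebalancing) by a single list kept sorted with bisect.insort, reading the lower median directly at index (L-1)//2 after each insertion.
import Mathlib
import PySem

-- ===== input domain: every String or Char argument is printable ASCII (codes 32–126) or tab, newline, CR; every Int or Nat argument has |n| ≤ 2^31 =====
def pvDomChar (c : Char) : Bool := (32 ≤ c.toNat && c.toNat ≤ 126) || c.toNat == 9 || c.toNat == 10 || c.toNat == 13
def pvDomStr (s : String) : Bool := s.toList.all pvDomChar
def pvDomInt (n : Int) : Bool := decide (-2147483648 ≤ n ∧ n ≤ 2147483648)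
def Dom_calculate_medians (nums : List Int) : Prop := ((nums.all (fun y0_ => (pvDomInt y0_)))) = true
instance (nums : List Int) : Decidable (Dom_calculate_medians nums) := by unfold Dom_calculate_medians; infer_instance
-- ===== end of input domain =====

-- B replaces A's two balanced heaps by one list kept sorted, reading the lower median
-- at index (L-1)//2 after each insertion (idiomatic; not faster).

-- ===== PORT A =====
-- A calls the heapq library. heapq's operations are ported by their priority-queue
-- contract: the heap is represented as an ascending sorted list, heappush = ordered
-- insertion, heappop = remove the minimum (the head), heap[0] = the minimum (the head).
-- This is exact for the observations A makes (push, pop-min, peek-min, len).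
def pvHeapPush (h : List Int) (x : Int) : List Int := h.orderedInsert (· ≤ ·) x

-- heappop: returns (minimum, remaining heap); Python raises on an empty heap, but A
-- only pops under a length guard that makes the heap nonempty, so the default is inert.
def pvHeapPop (h : List Int) : Int × List Int := (h.headD 0, h.tail)

-- one iteration of A's loop body (p = (i, num) from enumerate), split into its three
-- stages exactly as in A: choose the heap to push into, rebalance, add the median
def pvPushSide (maxh minh : List Int) (num : Int) : List Int × List Int :=
  if maxh.isEmpty ∨ num < -(maxh.headD 0) then (pvHeapPush maxh (-num), minh)
  else (maxh, pvHeapPush minh num)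

def pvRebalance (mm : List Int × List Int) : List Int × List Int :=
  if mm.2.length + 1 < mm.1.length then
    let po := pvHeapPop mm.1
    (po.2, pvHeapPush mm.2 (-po.1))
  else if mm.1.length < mm.2.length then
    let po := pvHeapPop mm.2
    (pvHeapPush mm.1 (-po.1), po.2)
  else mm

def pvMedian (i : Int) (mm : List Int × List Int) : Int :=
  if i % 2 == 0 then
    (if mm.2.length < mm.1.length then -(mm.1.headD 0) else mm.2.headD 0)
  else -(mm.1.headD 0)

def pvStepA (st : List Int × List Int × Int) (p : Int × Int) : List Int × List Int × Int :=
  let mm := pvRebalance (pvPushSide st.1 st.2.1 p.2)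
  (mm.1, mm.2, st.2.2 + pvMedian p.1 mm)

def calculate_medians (nums : List Int) : Int :=
  ((PySem.List.enumerate nums).foldl pvStepA ([], [], 0)).2.2

-- ===== PORT B =====
-- bisect.insort is ported as ordered insertion into the sorted list.
def pvStepB (st : List Int × Int) (num : Int) : List Int × Int :=
  let sp := st.1.orderedInsert (· ≤ ·) num
  (sp, st.2 + sp.getD ((sp.length - 1) / 2) 0)

def calculate_medians_alt (nums : List Int) : Int :=
  (nums.foldl pvStepB ([], 0)).2

-- ===== PRECONDITION & SPEC =====
def Spec_calculate_medians (nums : List Int) (out : Int) : Prop := out = calculate_medians_alt nums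
instance (nums : List Int) (out : Int) : Decidable (Spec_calculate_medians nums out) := by unfold Spec_calculate_medians; infer_instance

-- ===== CLAIM (what is proved, stated in full; the proofs are below) =====
def Claim_equal_calculate_medians : Prop := ∀ (nums : List Int), Dom_calculate_medians nums → Spec_calculate_medians nums (calculate_medians nums)

-- ===== LEMMAS AND PROOFS =====

-- two ascending lists with the same multiset of elements are equal
theorem sortedEq {l1 l2 : List Int} (h1 : l1.Pairwise (· ≤ ·)) (h2 : l2.Pairwise (· ≤ ·))
    (hp : l1.Perm l2) : l1 = l2 := List.Perm.eq_of_pairwise' h1 h2 hp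

-- the representation of A's max-heap holding the negations of the (sorted) list l
def maxRep (l : List Int) : List Int := (l.map (fun x => -x)).reverse

theorem maxRep_pairwise {l : List Int} (h : l.Pairwise (· ≤ ·)) :
    (maxRep l).Pairwise (· ≤ ·) := by
  simp only [maxRep, List.pairwise_reverse, List.pairwise_map]
  exact h.imp (by intro a b hab; simp; omega)

theorem maxRep_length (l : List Int) : (maxRep l).length = l.length := by
  simp [maxRep]

theorem maxRep_perm (l : List Int) : (maxRep l).Perm (l.map (fun x => -x)) := by
  simp [maxRep, List.reverse_perm]

-- pushing -a into the max-heap = representing the ordered insertion of a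
theorem maxRep_push {l : List Int} (h : l.Pairwise (· ≤ ·)) (a : Int) :
    (maxRep l).orderedInsert (· ≤ ·) (-a) = maxRep (l.orderedInsert (· ≤ ·) a) := by
  refine sortedEq ((maxRep_pairwise h).orderedInsert _ _) (maxRep_pairwise (h.orderedInsert _ _)) ?_
  refine ((List.perm_orderedInsert _ _ _).trans ?_).trans (maxRep_perm _).symm
  refine List.Perm.trans ?_ (((List.perm_orderedInsert (· ≤ ·) a l).map (fun x => -x)).symm)
  simp only [List.map_cons]
  exact ((maxRep_perm l).cons _)

theorem maxRep_headD {l : List Int} (h : l ≠ []) :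
    (maxRep l).headD 0 = -(l.getD (l.length - 1) 0) := by
  induction l using List.reverseRecOn with
  | nil => simp at h
  | append_singleton xs x ih =>
      simp [maxRep, List.getD_eq_getElem?_getD]

theorem maxRep_tail (l : List Int) : (maxRep l).tail = maxRep l.dropLast := by
  induction l using List.reverseRecOn with
  | nil => simp [maxRep]
  | append_singleton xs x ih => simp [maxRep]

-- getD convenience lemmas
theorem getD_take (l : List Int) {i k : Nat} (hik : i < k) :
    (l.take k).getD i 0 = l.getD i 0 := by
  simp [List.getD_eq_getElem?_getD, hik]

theorem headD_drop (l : List Int) (k : Nat) :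
    (l.drop k).headD 0 = l.getD k 0 := by
  simp [List.headD_eq_head?_getD, List.head?_eq_getElem?, List.getElem?_drop,
    List.getD_eq_getElem?_getD]

theorem drop_eq_getD_cons {l : List Int} {k : Nat} (h : k < l.length) :
    l.drop k = l.getD k 0 :: l.drop (k + 1) := by
  rw [List.drop_eq_getElem_cons h, List.getD_eq_getElem _ _ h]

theorem take_succ_eq {l : List Int} {k : Nat} (h : k < l.length) :
    l.take (k + 1) = l.take k ++ [l.getD k 0] := by
  rw [List.take_add_one]
  have : l[k]? = some (l.getD k 0) := by
    rw [List.getElem?_eq_getElem h, List.getD_eq_getElem _ _ h]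
  simp only [this, Option.toList_some]

theorem getD_mono {sp : List Int} (h : sp.Pairwise (· ≤ ·)) {i j : Nat} (hij : i ≤ j)
    (hj : j < sp.length) : sp.getD i 0 ≤ sp.getD j 0 := by
  rcases Nat.eq_or_lt_of_le hij with rfl | hlt
  · exact le_refl _
  · have hi : i < sp.length := lt_trans hlt hj
    rw [List.getD_eq_getElem _ _ hi, List.getD_eq_getElem _ _ hj]
    exact List.pairwise_iff_getElem.mp h i j hi hj hlt

theorem take_eq_replicate {sp : List Int} {k : Nat} (h : sp.Pairwise (· ≤ ·)) (hk1 : 1 ≤ k)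
    (hk : k ≤ sp.length) (hle : sp.getD (k - 1) 0 ≤ sp.getD 0 0) :
    sp.take k = List.replicate k (sp.getD 0 0) := by
  rw [List.eq_replicate_iff]
  refine ⟨by rw [List.length_take]; omega, ?_⟩
  intro x hx
  obtain ⟨i, hi, hix⟩ := List.mem_iff_getElem.mp hx
  have hlt : (sp.take k).length = k := by simp; omega
  rw [hlt] at hi
  have hisp : i < sp.length := by omega
  have hx0 : x = sp.getD i 0 := by
    rw [← hix, List.getElem_take, List.getD_eq_getElem _ _ hisp]
  have h1 : sp.getD 0 0 ≤ sp.getD i 0 := getD_mono h (Nat.zero_le i) hisp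
  have h2 : sp.getD i 0 ≤ sp.getD (k - 1) 0 := getD_mono h (by omega) (by omega)
  omega

-- insertion strictly left of the split point k
theorem insert_left (num : Int) : ∀ (sp : List Int) (k : Nat), sp.Pairwise (· ≤ ·) →
    k ≤ sp.length → ((sp = [] ∧ k = 0) ∨ (1 ≤ k ∧ num < sp.getD (k - 1) 0)) →
    ((sp.orderedInsert (· ≤ ·) num).take (k + 1)).Perm (num :: sp.take k) ∧
    (sp.orderedInsert (· ≤ ·) num).drop (k + 1) = sp.drop k
  | [], k, _, hk, _ => by
      simp only [List.length_nil, Nat.le_zero] at hk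
      subst hk; simp
  | b :: t, k, h, hk, hc => by
      rcases hc with ⟨heq, _⟩ | ⟨hk1, hlt⟩
      · exact absurd heq (by simp)
      by_cases hnb : num ≤ b
      · rw [List.orderedInsert_cons_of_le _ _ hnb]
        exact ⟨by simp, rfl⟩
      · rw [List.orderedInsert_of_not_le _ _ hnb]
        have hk2 : 2 ≤ k := by
          by_contra hlt2
          have hk1' : k = 1 := by omega
          subst hk1'
          have hlt' : num < b := by simpa using hlt
          exact hnb (le_of_lt hlt')
        obtain ⟨m, rfl⟩ : ∃ m, k = m + 2 := ⟨k - 2, by omega⟩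
        have ih := insert_left num t (m + 1) h.of_cons
          (by simp only [List.length_cons] at hk; omega)
          (Or.inr ⟨by omega, by simpa using hlt⟩)
        constructor
        · have e1 : ((b :: t.orderedInsert (· ≤ ·) num).take (m + 2 + 1))
              = b :: (t.orderedInsert (· ≤ ·) num).take (m + 2) := by simp
          have e2 : num :: (b :: t).take (m + 2) = num :: b :: t.take (m + 1) := by simp
          rw [e1, e2]
          exact List.Perm.trans (ih.1.cons b) (List.Perm.swap _ _ _)
        · simp only [List.drop_succ_cons]
          exact ih.2

-- insertion at or right of the split point k
theorem insert_right (num : Int) : ∀ (sp : List Int) (k : Nat), sp.Pairwise (· ≤ ·) →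
    1 ≤ k → k ≤ sp.length → sp.getD (k - 1) 0 ≤ num →
    ((sp.orderedInsert (· ≤ ·) num).take k).Perm (sp.take k) ∧
    ((sp.orderedInsert (· ≤ ·) num).drop k).Perm (num :: sp.drop k)
  | [], k, _, hk1, hk, _ => by simp at hk; omega
  | b :: t, k, h, hk1, hk, hle => by
      by_cases hnb : num ≤ b
      · rw [List.orderedInsert_cons_of_le _ _ hnb]
        have hble : b ≤ (b :: t).getD (k - 1) 0 := by
          have := getD_mono h (Nat.zero_le (k - 1)) (by omega)
          simpa using this
        have hnum : num = b := le_antisymm hnb (le_trans hble hle)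
        subst hnum
        have hpp : (num :: num :: t).Pairwise (· ≤ ·) := by
          rw [List.pairwise_cons]
          refine ⟨?_, h⟩
          intro x hx
          rcases List.mem_cons.mp hx with rfl | hxt
          · exact le_refl _
          · exact List.rel_of_pairwise_cons h hxt
        constructor
        · have hgd1 : (num :: num :: t).getD (k - 1) 0 ≤ (num :: num :: t).getD 0 0 := by
            simp only [List.getD_cons_zero]
            obtain ⟨m, rfl⟩ : ∃ m, k = m + 1 := ⟨k - 1, by omega⟩
            cases m with
            | zero => simp
            | succ m' =>
                simp only [Nat.add_sub_cancel, List.getD_cons_succ]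
                have hm' : m' + 1 < (num :: t).length := by
                  simp only [List.length_cons] at hk ⊢; omega
                exact le_trans (getD_mono h (by omega) hm') (by simpa using hle)
          have hgd2 : (num :: t).getD (k - 1) 0 ≤ (num :: t).getD 0 0 := by
            simpa using hle
          have e1 := take_eq_replicate hpp hk1 (by simp only [List.length_cons] at hk ⊢; omega) hgd1
          have e2 := take_eq_replicate h hk1 hk hgd2
          simp only [List.getD_cons_zero] at e1 e2
          rw [e1, e2]
        · obtain ⟨m, rfl⟩ : ∃ m, k = m + 1 := ⟨k - 1, by omega⟩
          rw [List.drop_succ_cons]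
          have hm : m < (num :: t).length := by omega
          rw [drop_eq_getD_cons hm]
          have : (num :: t).getD m 0 = num := by
            have h1 := getD_mono h (Nat.zero_le m) hm
            simp only [List.getD_cons_zero] at h1
            have h2 : (num :: t).getD m 0 ≤ num := by simpa using hle
            omega
          rw [this]
      · rw [List.orderedInsert_of_not_le _ _ hnb]
        obtain ⟨m, rfl⟩ : ∃ m, k = m + 1 := ⟨k - 1, by omega⟩
        cases m with
        | zero =>
            refine ⟨by simp, ?_⟩
            simpa using List.perm_orderedInsert (· ≤ ·) num t
        | succ m' =>
            have ih := insert_right num t (m' + 1) h.of_cons (by omega)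
              (by simp only [List.length_cons] at hk; omega) (by simpa using hle)
            exact ⟨by simpa using ih.1.cons b, by simpa using ih.2⟩

-- the step lemma: one iteration of A, on the state representing the sorted prefix sp,
-- produces the state representing the insertion of num, and adds B's median
theorem maxRep_take_headD {l : List Int} {m : Nat} (h1 : 1 ≤ m) (h2 : m ≤ l.length) :
    (maxRep (l.take m)).headD 0 = -(l.getD (m - 1) 0) := by
  have htm : (l.take m).length = m := by rw [List.length_take]; omega
  have hne : l.take m ≠ [] := by
    intro hh; rw [hh] at htm; simp at htm; omega
  rw [maxRep_headD hne, htm, getD_take l (by omega)]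

-- the step lemma: one iteration of A, on the state representing the sorted prefix sp,
-- produces the state representing the insertion of num, and adds B's median
theorem stepA_eq (sp : List Int) (num t : Int) (h : sp.Pairwise (· ≤ ·)) :
    pvStepA (maxRep (sp.take ((sp.length + 1) / 2)), sp.drop ((sp.length + 1) / 2), t)
      ((sp.length : Int), num) =
    (maxRep ((sp.orderedInsert (· ≤ ·) num).take ((sp.length + 2) / 2)),
     (sp.orderedInsert (· ≤ ·) num).drop ((sp.length + 2) / 2),
     t + (sp.orderedInsert (· ≤ ·) num).getD (sp.length / 2) 0) := by
  by_cases hL0 : sp.length = 0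
  · obtain rfl : sp = [] := List.eq_nil_of_length_eq_zero hL0
    simp [pvStepA, pvPushSide, pvRebalance, pvMedian, pvHeapPush, maxRep]
  · have hL1 : 1 ≤ sp.length := by omega
    set L := sp.length with hLdef
    set k := (L + 1) / 2 with hkdef
    set sp2 := sp.orderedInsert (· ≤ ·) num with hsp2def
    have hk1 : 1 ≤ k := by omega
    have hkL : k ≤ L := by omega
    have hlen2 : sp2.length = L + 1 := by
      rw [hsp2def, hLdef]; exact List.orderedInsert_length _ sp num
    have hs2 : sp2.Pairwise (· ≤ ·) := h.orderedInsert num sp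
    have htkpw : (sp.take k).Pairwise (· ≤ ·) := h.sublist (List.take_sublist k sp)
    have hdkpw : (sp.drop k).Pairwise (· ≤ ·) := h.sublist (List.drop_sublist k sp)
    have htk : (sp.take k).length = k := by rw [List.length_take]; omega
    have hdk : (sp.drop k).length = L - k := by rw [List.length_drop]
    have hheadD : (maxRep (sp.take k)).headD 0 = -(sp.getD (k - 1) 0) :=
      maxRep_take_headD hk1 hkL
    have hEmp : (maxRep (sp.take k)).isEmpty = false := by
      have hne : maxRep (sp.take k) ≠ [] := by
        intro hh
        have := congrArg List.length hh
        rw [maxRep_length, htk] at this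
        simp at this; omega
      simpa using hne
    have hk2even : L % 2 = 0 → (L + 2) / 2 = k + 1 := by omega
    have hk2odd : L % 2 = 1 → (L + 2) / 2 = k := by omega
    by_cases hclt : num < sp.getD (k - 1) 0
    · -- insertion goes into the max-heap
      have hcond : (maxRep (sp.take k)).isEmpty = true ∨
          num < -((maxRep (sp.take k)).headD 0) := Or.inr (by rw [hheadD]; omega)
      have il := insert_left num sp k h hkL (Or.inr ⟨hk1, hclt⟩)
      have E1 : (sp.take k).orderedInsert (· ≤ ·) num = sp2.take (k + 1) :=
        sortedEq (htkpw.orderedInsert num _) (hs2.sublist (List.take_sublist (k+1) sp2))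
          ((List.perm_orderedInsert _ num _).trans il.1.symm)
      have M1 : pvHeapPush (maxRep (sp.take k)) (-num) = maxRep (sp2.take (k + 1)) := by
        show (maxRep (sp.take k)).orderedInsert (· ≤ ·) (-num) = _
        rw [maxRep_push htkpw, E1]
      have E2 : sp2.drop (k + 1) = sp.drop k := il.2
      have mmA : pvPushSide (maxRep (sp.take k)) (sp.drop k) num =
          (maxRep (sp2.take (k + 1)), sp2.drop (k + 1)) := by
        rw [pvPushSide, if_pos hcond, M1, E2]
      have hm1len : (maxRep (sp2.take (k + 1))).length = k + 1 := by
        rw [maxRep_length, List.length_take]; omega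
      have hd1len : (sp2.drop (k + 1)).length = L - k := by
        rw [List.length_drop]; omega
      rcases Nat.even_or_odd L with hLe | hLo
      · -- L even, no rebalance
        have hLm : L % 2 = 0 := Nat.even_iff.mp hLe
        have mmB : pvRebalance (maxRep (sp2.take (k + 1)), sp2.drop (k + 1)) =
            (maxRep (sp2.take (k + 1)), sp2.drop (k + 1)) := by
          rw [pvRebalance, if_neg, if_neg]
          · rw [hm1len, hd1len]; omega
          · rw [hm1len, hd1len]; omega
        have med : pvMedian (L : Int) (maxRep (sp2.take (k + 1)), sp2.drop (k + 1)) =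
            sp2.getD (L / 2) 0 := by
          have hpar : ((L : Int) % 2 == 0) = true := by
            have : (L : Int) % 2 = 0 := by omega
            simp [this]
          rw [pvMedian, hpar]
          simp only [if_true]
          rw [if_pos (by rw [hm1len, hd1len]; omega)]
          rw [maxRep_take_headD (by omega) (by omega), neg_neg]
          congr 1
          omega
        simp only [pvStepA, mmA, mmB, med, hk2even hLm]
      · -- L odd: rebalance by popping the max-heap
        have hLm : L % 2 = 1 := Nat.odd_iff.mp hLo
        have hkodd : L - k = k - 1 := by omega
        have hdl : (sp2.take (k + 1)).dropLast = sp2.take k := by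
          rw [List.dropLast_eq_take, List.length_take]
          rw [List.take_take]
          congr 1
          omega
        have hph : pvHeapPush (sp2.drop (k + 1)) (sp2.getD k 0) = sp2.drop k := by
          show (sp2.drop (k + 1)).orderedInsert (· ≤ ·) (sp2.getD k 0) = _
          refine sortedEq ((hs2.sublist (List.drop_sublist (k+1) sp2)).orderedInsert _ _)
            (hs2.sublist (List.drop_sublist k sp2)) ?_
          refine (List.perm_orderedInsert _ _ _).trans ?_
          exact (List.Perm.of_eq (drop_eq_getD_cons (l := sp2) (by omega)).symm)
        have mmB : pvRebalance (maxRep (sp2.take (k + 1)), sp2.drop (k + 1)) =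
            (maxRep (sp2.take k), sp2.drop k) := by
          rw [pvRebalance, if_pos (by rw [hm1len, hd1len]; omega)]
          show ((maxRep (sp2.take (k+1))).tail,
                pvHeapPush (sp2.drop (k+1)) (-((maxRep (sp2.take (k+1))).headD 0))) = _
          rw [maxRep_tail, hdl, maxRep_take_headD (by omega) (by omega), neg_neg]
          rw [show k + 1 - 1 = k from rfl, hph]
        have med : pvMedian (L : Int) (maxRep (sp2.take k), sp2.drop k) =
            sp2.getD (L / 2) 0 := by
          have hpar : ((L : Int) % 2 == 0) = false := by
            have : (L : Int) % 2 = 1 := by omega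
            simp [this]
          rw [pvMedian, hpar]
          simp only [Bool.false_eq_true, if_false]
          rw [maxRep_take_headD (by omega) (by omega), neg_neg]
          congr 1
          omega
        simp only [pvStepA, mmA, mmB, med, hk2odd hLm]
    · -- insertion goes into the min-heap
      have hge : sp.getD (k - 1) 0 ≤ num := not_lt.mp hclt
      have hcondF : ¬((maxRep (sp.take k)).isEmpty = true ∨
          num < -((maxRep (sp.take k)).headD 0)) := by
        rintro (ha | hb)
        · rw [hEmp] at ha; exact Bool.false_ne_true ha
        · rw [hheadD] at hb; omega
      have ir := insert_right num sp k h hk1 hkL hge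
      have E3 : sp2.take k = sp.take k :=
        sortedEq (hs2.sublist (List.take_sublist k sp2)) htkpw ir.1
      have E4 : pvHeapPush (sp.drop k) num = sp2.drop k := by
        show (sp.drop k).orderedInsert (· ≤ ·) num = _
        refine sortedEq (hdkpw.orderedInsert num _)
          (hs2.sublist (List.drop_sublist k sp2)) ?_
        exact (List.perm_orderedInsert _ num _).trans ir.2.symm
      have mmA : pvPushSide (maxRep (sp.take k)) (sp.drop k) num =
          (maxRep (sp2.take k), sp2.drop k) := by
        rw [pvPushSide, if_neg hcondF, E4, E3]
      have hm1len : (maxRep (sp2.take k)).length = k := by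
        rw [maxRep_length, List.length_take]; omega
      have hd1len : (sp2.drop k).length = L + 1 - k := by
        rw [List.length_drop]; omega
      rcases Nat.even_or_odd L with hLe | hLo
      · -- L even: rebalance by popping the min-heap
        have hLm : L % 2 = 0 := Nat.even_iff.mp hLe
        have hhd : (sp2.drop k).headD 0 = sp2.getD k 0 := headD_drop sp2 k
        have E5 : (sp2.take k).orderedInsert (· ≤ ·) (sp2.getD k 0) = sp2.take (k + 1) := by
          refine sortedEq ((hs2.sublist (List.take_sublist k sp2)).orderedInsert _ _)
            (hs2.sublist (List.take_sublist (k+1) sp2)) ?_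
          refine (List.perm_orderedInsert _ _ _).trans ?_
          refine List.Perm.trans ((List.perm_append_singleton _ _).symm) ?_
          exact List.Perm.of_eq (take_succ_eq (l := sp2) (by omega)).symm
        have mmB : pvRebalance (maxRep (sp2.take k), sp2.drop k) =
            (maxRep (sp2.take (k + 1)), sp2.drop (k + 1)) := by
          rw [pvRebalance, if_neg (by rw [hm1len, hd1len]; omega),
            if_pos (by rw [hm1len, hd1len]; omega)]
          show (pvHeapPush (maxRep (sp2.take k)) (-((sp2.drop k).headD 0)),
                (sp2.drop k).tail) = _
          rw [hhd, List.tail_drop]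
          show ((maxRep (sp2.take k)).orderedInsert (· ≤ ·) (-(sp2.getD k 0)), _) = _
          rw [maxRep_push (hs2.sublist (List.take_sublist k sp2)), E5]
        have med : pvMedian (L : Int) (maxRep (sp2.take (k + 1)), sp2.drop (k + 1)) =
            sp2.getD (L / 2) 0 := by
          have hpar : ((L : Int) % 2 == 0) = true := by
            have : (L : Int) % 2 = 0 := by omega
            simp [this]
          rw [pvMedian, hpar]
          simp only [if_true]
          rw [if_pos (by
            rw [maxRep_length, List.length_take, List.length_drop]; omega)]
          rw [maxRep_take_headD (by omega) (by omega), neg_neg]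
          congr 1
          omega
        simp only [pvStepA, mmA, mmB, med, hk2even hLm]
      · -- L odd: no rebalance
        have hLm : L % 2 = 1 := Nat.odd_iff.mp hLo
        have mmB : pvRebalance (maxRep (sp2.take k), sp2.drop k) =
            (maxRep (sp2.take k), sp2.drop k) := by
          rw [pvRebalance, if_neg, if_neg]
          · rw [hm1len, hd1len]; omega
          · rw [hm1len, hd1len]; omega
        have med : pvMedian (L : Int) (maxRep (sp2.take k), sp2.drop k) =
            sp2.getD (L / 2) 0 := by
          have hpar : ((L : Int) % 2 == 0) = false := by
            have : (L : Int) % 2 = 1 := by omega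
            simp [this]
          rw [pvMedian, hpar]
          simp only [Bool.false_eq_true, if_false]
          rw [maxRep_take_headD (by omega) (by omega), neg_neg]
          congr 1
          omega
        simp only [pvStepA, mmA, mmB, med, hk2odd hLm]

theorem loop_eq (nums : List Int) : ∀ (sp : List Int) (t : Int), sp.Pairwise (· ≤ ·) →
    ((PySem.List.enumerate nums (sp.length : Int)).foldl pvStepA
        (maxRep (sp.take ((sp.length + 1) / 2)), sp.drop ((sp.length + 1) / 2), t)).2.2 =
    (nums.foldl pvStepB (sp, t)).2 := by
  induction nums with
  | nil => intro sp t _; simp [PySem.List.enumerate]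
  | cons num rest ih =>
      intro sp t hs
      rw [PySem.List.enumerate_cons, List.foldl_cons, stepA_eq sp num t hs]
      have hlen : (sp.orderedInsert (· ≤ ·) num).length = sp.length + 1 :=
        List.orderedInsert_length _ sp num
      have h2 : ((sp.orderedInsert (· ≤ ·) num).length + 1) / 2 = (sp.length + 2) / 2 := by
        rw [hlen]
      have h3 : ((sp.orderedInsert (· ≤ ·) num).length : Int) = (sp.length : Int) + 1 := by
        rw [hlen]; push_cast; ring
      have h4 : ((sp.orderedInsert (· ≤ ·) num).length - 1) / 2 = sp.length / 2 := by
        rw [hlen]; omega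
      have ih' := ih (sp.orderedInsert (· ≤ ·) num) (t + (sp.orderedInsert (· ≤ ·) num).getD (sp.length / 2) 0)
        (hs.orderedInsert num sp)
      rw [h2, h3] at ih'
      rw [ih']
      simp [pvStepB, List.foldl_cons, h4]

-- ===== VERDICT (by name: the statement is the Claim_ definition above) =====
theorem calculate_medians_spec : Claim_equal_calculate_medians := by
  intro nums _
  unfold Spec_calculate_medians calculate_medians calculate_medians_alt
  have := loop_eq nums [] 0 (by simp)
  simpa [maxRep] using this
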